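-- pv_equiv track=rewrite | github.com/zeph11/Audio-Visualizer | src/miniproject.py | returnIndices
-- ===== SOURCE A (Python) =====
-- def returnIndices(lst):
--     indices = []
--     current_count = 1
--     for i in range(1, len(lst) + 1):
--         indices.append(i)
--         if (i - current_count) == 3:
--             indices.append(i)
--             current_count = i
--     return indices
-- ===== SOURCE B (Python) =====
-- def returnIndices(lst):
--     n = len(lst)
--     return sorted(list(range(1, n + 1)) + list(range(4, n + 1, 3)))
-- ===== Notes on version B (the rewrite author's own statement) =====
-- stated objective: simpler
-- what changed: Replaces the stateful counter loop (append and conditionally double-append while tracking current_count) with a closed-form construction: the duplicated positions are exactly range(4, n+1, 3), so B returns sorted(range(1, n+1) + range(4, n+1, 3)).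
import Mathlib
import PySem

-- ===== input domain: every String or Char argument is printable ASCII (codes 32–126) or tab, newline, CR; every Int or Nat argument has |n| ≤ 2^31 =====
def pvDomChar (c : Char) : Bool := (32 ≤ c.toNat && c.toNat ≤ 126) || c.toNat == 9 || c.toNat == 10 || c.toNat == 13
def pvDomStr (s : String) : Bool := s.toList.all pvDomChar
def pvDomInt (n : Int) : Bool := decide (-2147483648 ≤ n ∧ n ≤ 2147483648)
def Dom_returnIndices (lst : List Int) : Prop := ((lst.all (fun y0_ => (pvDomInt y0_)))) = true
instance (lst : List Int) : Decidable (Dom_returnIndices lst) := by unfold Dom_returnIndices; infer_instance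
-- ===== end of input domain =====

-- B replaces A's stateful counter loop by a closed-form construction (sorted merge of
-- range(1,n+1) and the duplicated positions range(4,n+1,3)); objective: simpler.

-- ===== PORT A =====
def returnIndices (lst : List Int) : List Int :=
  (((PySem.List.pyRange 1 (PySem.List.len lst + 1) 1).foldl
      (fun (s : List Int × Int) (i : Int) =>
        let indices := s.1 ++ [i]
        if i - s.2 = 3 then (indices ++ [i], i) else (indices, s.2))
      ([], 1))).1

-- ===== PORT B =====
def returnIndices_alt (lst : List Int) : List Int :=
  let n := PySem.List.len lst
  PySem.List.sorted (PySem.List.pyRange 1 (n + 1) 1 ++ PySem.List.pyRange 4 (n + 1) 3)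
    (fun x => x) false

-- ===== PRECONDITION & SPEC =====
def Spec_returnIndices (lst : List Int) (out : List Int) : Prop := out = returnIndices_alt lst
instance (lst : List Int) (out : List Int) : Decidable (Spec_returnIndices lst out) := by unfold Spec_returnIndices; infer_instance

-- ===== CLAIM (what is proved, stated in full; the proofs are below) =====
def Claim_equal_returnIndices : Prop := ∀ (lst : List Int), Dom_returnIndices lst → Spec_returnIndices lst (returnIndices lst)

-- ===== LEMMAS AND PROOFS =====

-- the value A's loop has produced after processing i = 1 .. n
def pvOut : Nat → List Int
  | 0 => []
  | n + 1 => pvOut n ++ (if (n + 1) % 3 = 1 ∧ 4 ≤ n + 1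
      then [(n : Int) + 1, (n : Int) + 1] else [(n : Int) + 1])

-- the value of current_count after processing i = 1 .. n
def pvC (n : Nat) : Int := if n = 0 then 1 else 1 + 3 * (((n - 1) / 3 : Nat) : Int)

theorem pvLoopA (n : Nat) :
    (PySem.List.pyRange 1 ((n : Int) + 1) 1).foldl
      (fun (s : List Int × Int) (i : Int) =>
        let indices := s.1 ++ [i]
        if i - s.2 = 3 then (indices ++ [i], i) else (indices, s.2))
      ([], 1) = (pvOut n, pvC n) := by
  induction n with
  | zero => simp [PySem.List.pyRange_one_eq_nil, pvOut, pvC]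
  | succ n ih =>
      push_cast
      rw [PySem.List.pyRange_one_succ_right (show (1 : Int) ≤ (n : Int) + 1 by omega),
        List.foldl_append, ih]
      simp only [List.foldl_cons, List.foldl_nil]
      by_cases hc : (n + 1) % 3 = 1 ∧ 4 ≤ n + 1
      · have hcond : ((n : Int) + 1) - pvC n = 3 := by
          unfold pvC; split <;> omega
        simp only [hcond, pvOut, if_pos hc, if_true, Prod.mk.injEq]
        refine ⟨by simp, ?_⟩
        unfold pvC; split <;> omega
      · have hcond : ¬ (((n : Int) + 1) - pvC n = 3) := by
          unfold pvC; split <;> omega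
        simp only [if_neg hcond, pvOut, if_neg hc, Prod.mk.injEq]
        refine ⟨by simp, ?_⟩
        unfold pvC; split <;> split <;> omega

theorem pvRange3_succ (n : Nat) :
    PySem.List.pyRange 4 ((n : Int) + 1 + 1) 3 =
      PySem.List.pyRange 4 ((n : Int) + 1) 3 ++
        (if (n + 1) % 3 = 1 ∧ 4 ≤ n + 1 then [(n : Int) + 1] else []) := by
  rw [PySem.List.pyRange_of_pos 4 _ (by norm_num),
      PySem.List.pyRange_of_pos 4 _ (by norm_num)]
  by_cases hc : (n + 1) % 3 = 1 ∧ 4 ≤ n + 1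
  · have h1 : (if (4 : Int) < (n : Int) + 1 + 1 then (((n : Int) + 1 + 1 - 4 + 3 - 1) / 3).toNat else 0)
        = (if (4 : Int) < (n : Int) + 1 then (((n : Int) + 1 - 4 + 3 - 1) / 3).toNat else 0) + 1 := by
      split <;> split <;> omega
    have h2 : (4 : Int) + 3 * ((if (4 : Int) < (n : Int) + 1 then (((n : Int) + 1 - 4 + 3 - 1) / 3).toNat else 0) : Nat)
        = (n : Int) + 1 := by
      split <;> omega
    rw [h1, List.range_succ, List.map_append, if_pos hc]
    simp only [List.map_cons, List.map_nil, h2]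
  · have h1 : (if (4 : Int) < (n : Int) + 1 + 1 then (((n : Int) + 1 + 1 - 4 + 3 - 1) / 3).toNat else 0)
        = (if (4 : Int) < (n : Int) + 1 then (((n : Int) + 1 - 4 + 3 - 1) / 3).toNat else 0) := by
      split <;> split <;> omega
    rw [h1, if_neg hc, List.append_nil]

theorem pvShuffle2 (u v : List Int) (m : Int) :
    ((u ++ v) ++ [m, m]).Perm ((u ++ [m]) ++ (v ++ [m])) := by
  have h1 : (u ++ v) ++ [m, m] = u ++ (v ++ [m, m]) := by simp
  have h2 : (u ++ [m]) ++ (v ++ [m]) = u ++ ([m] ++ (v ++ [m])) := by simp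
  rw [h1, h2]
  refine List.Perm.append_left u ?_
  have h3 : v ++ [m, m] = (v ++ [m]) ++ [m] := by simp
  rw [h3]
  exact List.perm_append_comm

theorem pvShuffle1 (u v : List Int) (m : Int) :
    ((u ++ v) ++ [m]).Perm ((u ++ [m]) ++ v) := by
  have h1 : (u ++ v) ++ [m] = u ++ (v ++ [m]) := by simp
  have h2 : (u ++ [m]) ++ v = u ++ ([m] ++ v) := by simp
  rw [h1, h2]
  exact List.Perm.append_left u List.perm_append_comm

theorem pvPerm (n : Nat) :
    (pvOut n).Perm
      (PySem.List.pyRange 1 ((n : Int) + 1) 1 ++ PySem.List.pyRange 4 ((n : Int) + 1) 3) := by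
  induction n with
  | zero =>
      have h4 : PySem.List.pyRange 4 1 3 = [] := by
        rw [PySem.List.pyRange_of_pos 4 1 (by norm_num)]
        norm_num
      simp [pvOut, PySem.List.pyRange_one_eq_nil, h4]
  | succ n ih =>
      push_cast
      rw [pvOut, PySem.List.pyRange_one_succ_right (show (1 : Int) ≤ (n : Int) + 1 by omega),
        pvRange3_succ n]
      by_cases hc : (n + 1) % 3 = 1 ∧ 4 ≤ n + 1
      · rw [if_pos hc, if_pos hc]
        exact (ih.append_right [(n : Int) + 1, (n : Int) + 1]).trans
          (pvShuffle2 _ _ ((n : Int) + 1))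
      · rw [if_neg hc, if_neg hc, List.append_nil]
        exact (ih.append_right [(n : Int) + 1]).trans (pvShuffle1 _ _ ((n : Int) + 1))

theorem pvOut_le (n : Nat) : ∀ x ∈ pvOut n, x ≤ (n : Int) := by
  induction n with
  | zero => simp [pvOut]
  | succ n ih =>
      intro x hx
      rw [pvOut, List.mem_append] at hx
      rcases hx with hx | hx
      · have := ih x hx; push_cast; omega
      · split at hx <;> simp at hx <;> (try rcases hx with hx | hx) <;> push_cast <;> omega

theorem pvOut_pairwise (n : Nat) : (pvOut n).Pairwise (· ≤ ·) := by
  induction n with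
  | zero => simp [pvOut]
  | succ n ih =>
      rw [pvOut, List.pairwise_append]
      refine ⟨ih, ?_, ?_⟩
      · split <;> simp
      · intro x hx y hy
        have hxle := pvOut_le n x hx
        have : y = (n : Int) + 1 := by
          split at hy <;> simp at hy <;> (try rcases hy with hy | hy) <;> omega
        omega

-- ===== VERDICT (by name: the statement is the Claim_ definition above) =====
theorem returnIndices_spec : Claim_equal_returnIndices := by
  intro lst _
  unfold Spec_returnIndices returnIndices returnIndices_alt
  simp only [PySem.List.len_eq]
  rw [pvLoopA lst.length]
  exact (PySem.List.sorted_id_eq_of_perm_of_pairwise _ _ (pvPerm lst.length)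
    (pvOut_pairwise lst.length)).symm
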